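-- pv_equiv track=rewrite | github.com/akash012345/vigenere-cipher-hacker | vigenere cipher hacker.py | make_strings
-- ===== SOURCE A (Python) =====
-- n=5
--
-- LETTERS = 'ABCDEFGHIJKLMNOPQRSTUVWXYZ'
--
-- def make_strings(message):
--
-- 	strings=['']*n
--
-- 	k=0;
--
-- 	for i in message:
-- 		if i in LETTERS:
--
-- 			strings[k] += i
-- 			k+=1
-- 			k=k%n
-- 	return strings
-- ===== SOURCE B (Python) =====
-- n = 5
--
-- LETTERS = 'ABCDEFGHIJKLMNOPQRSTUVWXYZ'
--
-- def make_strings(message):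
--     letters = [c for c in message if c in LETTERS]
--     return [''.join(letters[j::n]) for j in range(n)]
-- ===== Notes on version B (the rewrite author's own statement) =====
-- stated objective: idiomatic
-- what changed: Replaces the modular-counter round-robin fill with a filter of the letters followed by n strided slices letters[j::n] joined into strings.
import Mathlib
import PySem

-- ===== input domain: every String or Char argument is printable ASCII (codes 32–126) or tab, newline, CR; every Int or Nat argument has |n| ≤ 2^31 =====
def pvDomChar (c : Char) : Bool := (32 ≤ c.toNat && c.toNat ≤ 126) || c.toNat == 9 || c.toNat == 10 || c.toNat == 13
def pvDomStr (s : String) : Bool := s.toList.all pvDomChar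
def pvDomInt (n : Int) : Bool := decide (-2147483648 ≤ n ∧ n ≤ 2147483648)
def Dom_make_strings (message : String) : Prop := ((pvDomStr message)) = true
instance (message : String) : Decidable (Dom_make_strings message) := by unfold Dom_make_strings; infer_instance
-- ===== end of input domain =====

-- B replaces A's single pass with a modular counter by a filter of the letters
-- followed by five strided slices letters[j::5]; same result, more idiomatic.

-- ===== PORT A =====
def pyLETTERS : List Char := "ABCDEFGHIJKLMNOPQRSTUVWXYZ".toList

-- loop body of A's for-loop; `i in LETTERS` for a single char is exactly list membership
def pvStepA (st : List (List Char) × Nat) (i : Char) : List (List Char) × Nat :=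
  if pyLETTERS.contains i then
    (st.1.set st.2 (st.1.getD st.2 [] ++ [i]), (st.2 + 1) % 5)
  else st

-- the five growing strings are kept as List Char (exact) and become Strings at return
def make_strings (message : String) : List String :=
  (message.toList.foldl pvStepA (List.replicate 5 [], 0)).1.map String.ofList

-- ===== PORT B =====
-- letters[j::5] for 0 ≤ j < len: element j, then every 5th after it (exact for this slice)
def takeEvery5 : List Char → List Char
  | [] => []
  | c :: rest => c :: takeEvery5 (rest.drop 4)
termination_by l => l.length
decreasing_by simp

def make_strings_alt (message : String) : List String :=
  let letters := message.toList.filter (fun c => pyLETTERS.contains c)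
  (List.range 5).map (fun j => String.ofList (takeEvery5 (letters.drop j)))

-- ===== PRECONDITION & SPEC =====
def Spec_make_strings (message : String) (out : List String) : Prop := out = make_strings_alt message
instance (message : String) (out : List String) : Decidable (Spec_make_strings message out) := by unfold Spec_make_strings; infer_instance

-- ===== CLAIM (what is proved, stated in full; the proofs are below) =====
def Claim_equal_make_strings : Prop := ∀ (message : String), Dom_make_strings message → Spec_make_strings message (make_strings message)

-- ===== LEMMAS AND PROOFS =====

theorem takeEvery5_nil : takeEvery5 [] = [] := by rw [takeEvery5]

theorem takeEvery5_cons (c : Char) (rest : List Char) :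
    takeEvery5 (c :: rest) = c :: takeEvery5 (rest.drop 4) := by rw [takeEvery5]

-- round-robin buckets of ls starting at counter k, back-to-front
def bk : Nat → List Char → List (List Char)
  | _, [] => List.replicate 5 []
  | k, c :: ls => (bk ((k + 1) % 5) ls).set k (c :: (bk ((k + 1) % 5) ls).getD k [])

theorem bk_length (ls : List Char) : ∀ k, (bk k ls).length = 5 := by
  induction ls with
  | nil => intro k; simp [bk]
  | cons c ls ih => intro k; simp [bk, ih]

theorem foldl_filter_letters (ls : List Char) :
    ∀ s : List (List Char) × Nat,
      ls.foldl pvStepA s = (ls.filter (fun c => pyLETTERS.contains c)).foldl pvStepA s := by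
  induction ls with
  | nil => intro s; rfl
  | cons c ls ih =>
    intro s
    by_cases h : pyLETTERS.contains c
    · rw [List.filter_cons, if_pos h, List.foldl_cons, List.foldl_cons]
      exact ih _
    · rw [List.filter_cons, if_neg h, List.foldl_cons,
          show pvStepA s c = s by unfold pvStepA; rw [if_neg h]]
      exact ih s

theorem zip_set (ss : List (List Char)) :
    ∀ (ts : List (List Char)) (k : Nat) (c : Char),
      List.zipWith (· ++ ·) ss (ts.set k (c :: ts.getD k [])) =
      List.zipWith (· ++ ·) (ss.set k (ss.getD k [] ++ [c])) ts := by
  induction ss with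
  | nil => intro ts k c; simp
  | cons s ss ih =>
    intro ts k c
    cases ts with
    | nil => cases k <;> simp
    | cons t ts =>
      cases k with
      | zero => simp
      | succ k =>
        simp only [List.set_cons_succ, List.getD_cons_succ, List.zipWith_cons_cons,
          List.cons.injEq, true_and]
        exact ih ts k c

theorem zip_rep_right (ss : List (List Char)) :
    List.zipWith (· ++ ·) ss (List.replicate ss.length ([] : List Char)) = ss := by
  induction ss with
  | nil => rfl
  | cons s ss ih => simp [List.replicate_succ, ih]

theorem zip_rep_left (ts : List (List Char)) :
    List.zipWith (· ++ ·) (List.replicate ts.length ([] : List Char)) ts = ts := by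
  induction ts with
  | nil => rfl
  | cons t ts ih => simp [List.replicate_succ, ih]

theorem afold (ls : List Char) :
    ∀ (ss : List (List Char)) (k : Nat), ss.length = 5 → k < 5 →
      (∀ c ∈ ls, pyLETTERS.contains c) →
      (ls.foldl pvStepA (ss, k)).1 = List.zipWith (· ++ ·) ss (bk k ls) := by
  induction ls with
  | nil =>
    intro ss k hlen _ _
    simp [bk, ← hlen, zip_rep_right]
  | cons c ls ih =>
    intro ss k hlen hk hmem
    have hc : pyLETTERS.contains c := hmem c (List.mem_cons_self ..)
    simp only [List.foldl_cons]
    rw [show pvStepA (ss, k) c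
        = (ss.set k (ss.getD k [] ++ [c]), (k + 1) % 5) by unfold pvStepA; rw [if_pos hc]]
    rw [ih _ _ (by simp [hlen]) (Nat.mod_lt _ (by omega))
        (fun x hx => hmem x (List.mem_cons_of_mem _ hx))]
    rw [show bk k (c :: ls)
        = (bk ((k + 1) % 5) ls).set k (c :: (bk ((k + 1) % 5) ls).getD k []) from rfl]
    rw [zip_set]

theorem bk_getD (ls : List Char) :
    ∀ k j, k < 5 → j < 5 →
      (bk k ls).getD j [] = takeEvery5 (ls.drop ((j + 5 - k) % 5)) := by
  induction ls with
  | nil =>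
    intro k j hk hj
    simp only [bk, List.drop_nil, takeEvery5_nil]
    interval_cases j <;> rfl
  | cons c ls ih =>
    intro k j hk hj
    have hlen : (bk ((k + 1) % 5) ls).length = 5 := bk_length ls _
    have hk' : (k + 1) % 5 < 5 := Nat.mod_lt _ (by omega)
    by_cases hjk : j = k
    · subst hjk
      have h1 : (bk j (c :: ls)).getD j []
          = c :: (bk ((j + 1) % 5) ls).getD j [] := by
        simp [bk, List.getD_eq_getElem?_getD, List.getElem?_set_self (by omega : j < (bk ((j + 1) % 5) ls).length)]
      rw [h1, ih _ _ hk' hj]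
      have h2 : (j + 5 - (j + 1) % 5) % 5 = 4 := by interval_cases j <;> rfl
      have h3 : (j + 5 - j) % 5 = 0 := by omega
      rw [h2, h3, List.drop_zero, takeEvery5_cons]
    · have h1 : (bk k (c :: ls)).getD j [] = (bk ((k + 1) % 5) ls).getD j [] := by
        simp [bk, List.getD_eq_getElem?_getD, List.getElem?_set_ne (by omega : k ≠ j)]
      rw [h1, ih _ _ hk' hj]
      have hm1 : 1 ≤ (j + 5 - k) % 5 := by omega
      have hidx : (j + 5 - k) % 5 - 1 = (j + 5 - (k + 1) % 5) % 5 := by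
        interval_cases k <;> interval_cases j <;> omega
      have : (c :: ls).drop ((j + 5 - k) % 5) = ls.drop ((j + 5 - k) % 5 - 1) := by
        rw [show (j + 5 - k) % 5 = ((j + 5 - k) % 5 - 1) + 1 by omega]
        simp
      rw [this, hidx]

-- ===== VERDICT (by name: the statement is the Claim_ definition above) =====
theorem make_strings_spec : Claim_equal_make_strings := by
  unfold Claim_equal_make_strings Spec_make_strings
  intro message _
  unfold make_strings make_strings_alt
  rw [foldl_filter_letters]
  set letters := message.toList.filter (fun c => pyLETTERS.contains c) with hletters
  rw [afold letters _ 0 (by simp) (by omega)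
      (fun c hc => (List.mem_filter.mp (hletters ▸ hc)).2)]
  rw [show (List.replicate 5 ([] : List Char)) = List.replicate (bk 0 letters).length [] by
      rw [bk_length]]
  rw [zip_rep_left]
  apply List.ext_getElem
  · simp [bk_length]
  · intro j h1 h2
    have hj : j < 5 := by simpa [bk_length] using h1
    have : (bk 0 letters)[j]'(by simpa [bk_length]) = (bk 0 letters).getD j [] := by
      simp [List.getD_eq_getElem?_getD, List.getElem?_eq_getElem (by simpa [bk_length] : j < (bk 0 letters).length)]
    simp only [List.getElem_map, this, bk_getD letters 0 j (by omega) hj]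
    simp [Nat.mod_eq_of_lt hj]
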